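-- pv_equiv track=rewrite | github.com/charlie-campanella/big-city-bias | viz/data.py | findCity
-- ===== SOURCE A (Python) =====
-- def findCity(name, options):
--     for option in options:
--         if option.startswith(name):
--             return option
--
--     for option in options:
--         if option.lower().startswith(name.split(',')[0].lower()):
--             return option
--     return name
-- ===== SOURCE B (Python) =====
-- def findCity(name, options):
--     key = name.split(',')[0].lower()
--     fuzzy = None
--     for option in options:
--         if option.startswith(name):
--             return option
--         if fuzzy is None and option.lower().startswith(key):
--             fuzzy = option
--     return fuzzy if fuzzy is not None else name
-- ===== Notes on version B (the rewrite author's own statement) =====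
-- stated objective: faster
-- what changed: Replaces A's two sequential scans (exact-prefix then fuzzy-prefix) with a single pass that short-circuits on the first exact match while carrying the first fuzzy candidate in an accumulator, and computes the lowercased split key once per call instead of re-splitting and re-lowering name on every iteration of the second loop.
import Mathlib
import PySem

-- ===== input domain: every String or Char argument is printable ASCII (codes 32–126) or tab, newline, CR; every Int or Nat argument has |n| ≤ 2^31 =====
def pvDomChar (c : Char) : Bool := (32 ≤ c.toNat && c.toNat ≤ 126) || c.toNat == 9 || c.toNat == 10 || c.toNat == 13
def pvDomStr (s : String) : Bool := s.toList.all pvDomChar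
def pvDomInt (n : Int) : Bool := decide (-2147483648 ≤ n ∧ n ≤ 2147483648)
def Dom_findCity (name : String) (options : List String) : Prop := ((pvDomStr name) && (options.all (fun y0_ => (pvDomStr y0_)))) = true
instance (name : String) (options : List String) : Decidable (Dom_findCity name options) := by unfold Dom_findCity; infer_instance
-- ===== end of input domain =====

-- B merges A's two sequential scans into one pass carrying the first fuzzy candidate; same results, key lowered once.

-- ===== PORT A =====
-- first for-loop of A: return the first option with option.startswith(name)
def findCityLoop1 (name : String) : List String → Option String
  | [] => none
  | o :: rest => if PySem.Str.startswith o name then some o else findCityLoop1 name rest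

-- second for-loop of A: first option with option.lower().startswith(name.split(',')[0].lower())
-- (name.split(',')[0] ported as headD "": split with a nonempty separator is never empty, so [0] never raises)
def findCityLoop2 (name : String) : List String → Option String
  | [] => none
  | o :: rest =>
      if PySem.Str.startswith (PySem.Str.lower o) (PySem.Str.lower (((PySem.Str.split? name ",").getD []).headD "")) then some o
      else findCityLoop2 name rest

def findCity (name : String) (options : List String) : String :=
  match findCityLoop1 name options with
  | some o => o
  | none =>
    match findCityLoop2 name options with
    | some o => o
    | none => name

-- ===== PORT B =====
-- single pass with a fuzzy accumulator
def findCityAltLoop (name key : String) : List String → Option String → String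
  | [], fuzzy => match fuzzy with | some f => f | none => name
  | o :: rest, fuzzy =>
      if PySem.Str.startswith o name then o
      else findCityAltLoop name key rest
        (if fuzzy.isNone && PySem.Str.startswith (PySem.Str.lower o) key then some o else fuzzy)

def findCity_alt (name : String) (options : List String) : String :=
  findCityAltLoop name (PySem.Str.lower (((PySem.Str.split? name ",").getD []).headD "")) options none

-- ===== PRECONDITION & SPEC =====
def Spec_findCity (name : String) (options : List String) (out : String) : Prop := out = findCity_alt name options
instance (name : String) (options : List String) (out : String) : Decidable (Spec_findCity name options out) := by unfold Spec_findCity; infer_instance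

-- ===== CLAIM (what is proved, stated in full; the proofs are below) =====
def Claim_equal_findCity : Prop := ∀ (name : String) (options : List String), Dom_findCity name options → Spec_findCity name options (findCity name options)

-- ===== LEMMAS AND PROOFS =====
theorem findCityAltLoop_eq (name : String) (options : List String) (fuzzy : Option String) :
    findCityAltLoop name (PySem.Str.lower (((PySem.Str.split? name ",").getD []).headD "")) options fuzzy =
      match findCityLoop1 name options with
      | some o => o
      | none =>
        match fuzzy with
        | some f => f
        | none =>
          match findCityLoop2 name options with
          | some o => o
          | none => name := by
  induction options generalizing fuzzy with
  | nil => cases fuzzy <;> simp [findCityAltLoop, findCityLoop1, findCityLoop2]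
  | cons o rest ih =>
    simp only [findCityAltLoop, findCityLoop1, findCityLoop2]
    by_cases h1 : PySem.Chars.startswith o.toList name.toList = true
    · simp [PySem.Str.startswith, h1]
    · simp only [PySem.Str.startswith, h1, if_false]
      rw [ih]
      cases fuzzy with
      | some f => simp
      | none =>
        by_cases h2 : PySem.Chars.startswith (PySem.Chars.lower o.toList)
            (PySem.Chars.lower ((((PySem.Str.split? name ",").getD []).head?.getD "").toList)) = true
        · simp [h2]
        · simp [h2]

-- ===== VERDICT (by name: the statement is the Claim_ definition above) =====
theorem findCity_spec : Claim_equal_findCity := by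
  intro name options _
  unfold Spec_findCity findCity findCity_alt
  rw [findCityAltLoop_eq]
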